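-- pv_equiv track=rewrite | github.com/ansible/ansible | test/sanity/code-smell/docs-build.py | simplify_stdout
-- ===== SOURCE A (Python) =====
-- def simplify_stdout(value):
--     """Simplify output by omitting earlier 'rendering: ...' messages."""
--     lines = value.strip().splitlines()
--
--     rendering = []
--     keep = []
--
--     def truncate_rendering():
--         """Keep last rendering line (if any) with a message about omitted lines as needed."""
--         if not rendering:
--             return
--
--         notice = rendering[-1]
--
--         if len(rendering) > 1:
--             notice += ' (%d previous rendering line(s) omitted)' % (len(rendering) - 1)
--
--         keep.append(notice)
--         rendering[:] = []
--
--     for line in lines: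
--         if line.startswith('rendering: '):
--             rendering.append(line)
--             continue
--
--         truncate_rendering()
--         keep.append(line)
--
--     truncate_rendering()
--
--     result = '\n'.join(keep)
--
--     return result
-- ===== SOURCE B (Python) =====
-- def simplify_stdout(value):
--     """Simplify output by omitting earlier 'rendering: ...' messages."""
--     lines = value.strip().splitlines()
--     out = []
--     i = 0
--     n = len(lines)
--
--     while i < n:
--         is_rendering = lines[i].startswith('rendering: ')
--         j = i + 1
--
--         while j < n and lines[j].startswith('rendering: ') == is_rendering:
--             j += 1
--
--         if is_rendering:
--             notice = lines[j - 1]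
--
--             if j - i > 1:
--                 notice += ' (%d previous rendering line(s) omitted)' % (j - i - 1)
--
--             out.append(notice)
--         else:
--             out.extend(lines[i:j])
--
--         i = j
--
--     return '\n'.join(out)
-- ===== Notes on version B (the rewrite author's own statement) =====
-- stated objective: alternative
-- what changed: Replaced A's streaming buffer-and-flush (mutable rendering buffer flushed by a nested truncate helper) with a two-pointer run-length scan that processes each maximal run of rendering/non-rendering lines in one step.
import Mathlib
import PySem

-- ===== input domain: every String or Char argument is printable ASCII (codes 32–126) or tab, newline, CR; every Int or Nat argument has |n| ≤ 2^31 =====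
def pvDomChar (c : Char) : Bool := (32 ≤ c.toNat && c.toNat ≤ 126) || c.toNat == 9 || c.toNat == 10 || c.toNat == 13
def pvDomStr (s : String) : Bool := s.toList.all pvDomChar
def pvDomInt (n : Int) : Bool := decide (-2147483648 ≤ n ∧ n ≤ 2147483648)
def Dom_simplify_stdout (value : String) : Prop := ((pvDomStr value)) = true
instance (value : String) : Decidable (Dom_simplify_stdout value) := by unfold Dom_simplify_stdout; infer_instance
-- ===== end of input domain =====

-- B is an alternative, structurally different implementation: a two-pointer run-length
-- scan over maximal runs of rendering/non-rendering lines instead of A's streaming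
-- buffer-and-flush; same O(n) cost, same return value.

-- shared literals of both Pythons
def pvIsRendering (l : List Char) : Bool := PySem.Chars.startswith l "rendering: ".toList

def pvNote (n : Int) : List Char :=
  " (".toList ++ PySem.Int.toChars n ++ " previous rendering line(s) omitted)".toList

-- ===== PORT A =====
-- truncate_rendering(): keep last rendering line with a note about omitted lines
def pvTrunc (rendering keep : List (List Char)) : List (List Char) :=
  if rendering = [] then keep
  else
    let notice := PySem.List.pyGetD rendering (-1) []
    let notice := if 1 < rendering.length then notice ++ pvNote ((rendering.length : Int) - 1) else notice
    keep ++ [notice]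

-- the for-loop over lines, carrying (rendering, keep); final truncate at the end
def pvLoopA : List (List Char) → List (List Char) → List (List Char) → List (List Char)
  | rendering, keep, [] => pvTrunc rendering keep
  | rendering, keep, l :: ls =>
    if pvIsRendering l then pvLoopA (rendering ++ [l]) keep ls
    else pvLoopA [] (pvTrunc rendering keep ++ [l]) ls

def simplify_stdout (value : String) : String :=
  String.ofList (PySem.Chars.join "\n".toList (pvLoopA [] [] (PySem.Chars.splitlines (PySem.Chars.strip value.toList))))

-- ===== PORT B =====
-- the outer while loop: take the maximal run lines[i:j] with the same key, process it, continue at j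
def pvLoopB : List (List Char) → List (List Char)
  | [] => []
  | x :: xs =>
    let run := x :: xs.takeWhile (fun l => pvIsRendering l == pvIsRendering x)
    let rest := xs.dropWhile (fun l => pvIsRendering l == pvIsRendering x)
    (if pvIsRendering x then
      let notice := PySem.List.pyGetD run (-1) []
      let notice := if 1 < run.length then notice ++ pvNote ((run.length : Int) - 1) else notice
      [notice]
     else run) ++ pvLoopB rest
termination_by ls => ls.length
decreasing_by simpa using Nat.lt_succ_of_le (List.length_dropWhile_le _ _)

def simplify_stdout_alt (value : String) : String :=
  String.ofList (PySem.Chars.join "\n".toList (pvLoopB (PySem.Chars.splitlines (PySem.Chars.strip value.toList))))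

-- ===== PRECONDITION & SPEC =====
def Spec_simplify_stdout (value : String) (out : String) : Prop := out = simplify_stdout_alt value
instance (value : String) (out : String) : Decidable (Spec_simplify_stdout value out) := by unfold Spec_simplify_stdout; infer_instance

-- ===== CLAIM (what is proved, stated in full; the proofs are below) =====
def Claim_equal_simplify_stdout : Prop := ∀ (value : String), Dom_simplify_stdout value → Spec_simplify_stdout value (simplify_stdout value)

-- ===== LEMMAS AND PROOFS =====

-- A's loop with an empty buffer: a pending rendering run is just absorbed into the buffer
theorem pvLoopA_absorb (r' : List (List Char)) (h : ∀ l ∈ r', pvIsRendering l = true) :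
    ∀ (r k ls : List (List Char)), pvLoopA r k (r' ++ ls) = pvLoopA (r ++ r') k ls := by
  induction r' with
  | nil => simp
  | cons a as ih =>
    intro r k ls
    have ha : pvIsRendering a = true := h a (by simp)
    simp only [List.cons_append, pvLoopA, ha, if_pos]
    rw [ih (fun l hl => h l (by simp [hl]))]
    simp
theorem pvLoopA_pass (run : List (List Char)) (h : ∀ l ∈ run, pvIsRendering l = false) :
    ∀ (k ls : List (List Char)), pvLoopA [] k (run ++ ls) = pvLoopA [] (k ++ run) ls := by
  induction run with
  | nil => simp
  | cons a as ih =>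
    intro k ls
    have ha : pvIsRendering a = false := h a (by simp)
    simp only [List.cons_append, pvLoopA, ha, Bool.false_eq_true, if_false, pvTrunc]
    rw [ih (fun l hl => h l (by simp [hl]))]
    simp
theorem pvTrunc_nil (k : List (List Char)) : pvTrunc [] k = k := by simp [pvTrunc]
theorem dropWhile_head_false {α : Type} (p : α → Bool) (xs : List α) (y : α) (ys : List α)
    (h : xs.dropWhile p = y :: ys) : p y = false := by
  induction xs with
  | nil => simp [List.dropWhile] at h
  | cons a as ih =>
    by_cases hp : p a
    · exact ih (by simpa [List.dropWhile, hp] using h)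
    · simp only [List.dropWhile, hp] at h
      cases h; simpa using hp
theorem pvLoop_main : ∀ (n : Nat) (ls k : List (List Char)), ls.length ≤ n →
    pvLoopA [] k ls = k ++ pvLoopB ls := by
  intro n
  induction n with
  | zero =>
    intro ls k h
    have : ls = [] := List.eq_nil_of_length_eq_zero (Nat.le_zero.mp h)
    subst this
    simp [pvLoopA, pvLoopB, pvTrunc]
  | succ n ih =>
    intro ls k h
    match ls with
    | [] => simp [pvLoopA, pvLoopB, pvTrunc]
    | x :: xs =>
      rw [pvLoopB]
      set p : List Char → Bool := fun l => pvIsRendering l == pvIsRendering x with hp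
      have hsplit : xs.takeWhile p ++ xs.dropWhile p = xs := List.takeWhile_append_dropWhile
      have hrest_len : (xs.dropWhile p).length ≤ n := by
        have := List.length_dropWhile_le p xs
        simp at h; omega
      by_cases hx : pvIsRendering x = true
      · -- a rendering run
        have hrun : ∀ l ∈ xs.takeWhile p, pvIsRendering l = true := by
          intro l hl
          have := List.mem_takeWhile_imp hl
          simp only [hp, beq_iff_eq, hx] at this
          exact this
        have step1 : pvLoopA [] k (x :: xs) = pvLoopA ([x] ++ xs.takeWhile p) k (xs.dropWhile p) := by
          conv_lhs => rw [show x :: xs = x :: (xs.takeWhile p ++ xs.dropWhile p) by rw [hsplit]]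
          simp only [pvLoopA, hx, if_pos, List.nil_append]
          exact pvLoopA_absorb _ hrun _ _ _
        rw [step1]
        cases hdrop : xs.dropWhile p with
        | nil =>
          simp only [pvLoopA, pvLoopB, hx, if_pos]
          simp [pvTrunc]
        | cons y ys =>
          have hy : pvIsRendering y = false := by
            have := dropWhile_head_false p xs y ys hdrop
            simp only [hp, beq_eq_false_iff_ne, hx, ne_eq] at this
            simpa using this
          have hlen : (y :: ys).length ≤ n := hdrop ▸ hrest_len
          have e1 : pvLoopA ([x] ++ xs.takeWhile p) k (y :: ys)
              = pvLoopA [] (pvTrunc ([x] ++ xs.takeWhile p) k ++ [y]) ys := by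
            simp only [pvLoopA, hy, Bool.false_eq_true, if_false]
          have e2 : pvLoopA [] (pvTrunc ([x] ++ xs.takeWhile p) k) (y :: ys)
              = pvLoopA [] (pvTrunc ([x] ++ xs.takeWhile p) k ++ [y]) ys := by
            simp only [pvLoopA, hy, Bool.false_eq_true, if_false, pvTrunc_nil]
          rw [e1, ← e2, ih (y :: ys) _ hlen, hx]
          simp [pvTrunc]
      · -- a non-rendering run
        have hx' : pvIsRendering x = false := by simpa using hx
        have hrun : ∀ l ∈ xs.takeWhile p, pvIsRendering l = false := by
          intro l hl
          have := List.mem_takeWhile_imp hl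
          simp only [hp, beq_iff_eq, hx'] at this
          exact this
        have step1 : pvLoopA [] k (x :: xs) = pvLoopA [] (k ++ (x :: xs.takeWhile p)) (xs.dropWhile p) := by
          conv_lhs => rw [show x :: xs = x :: (xs.takeWhile p ++ xs.dropWhile p) by rw [hsplit]]
          simp only [pvLoopA, hx', Bool.false_eq_true, if_false, pvTrunc]
          rw [pvLoopA_pass _ hrun]
          simp
        rw [step1, ih _ _ hrest_len, hx']
        simp

-- ===== VERDICT (by name: the statement is the Claim_ definition above) =====
theorem simplify_stdout_spec : Claim_equal_simplify_stdout := by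
  intro value _
  unfold Spec_simplify_stdout simplify_stdout simplify_stdout_alt
  rw [pvLoop_main (PySem.Chars.splitlines (PySem.Chars.strip value.toList)).length _ [] le_rfl]
  simp
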